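-- pv_equiv track=rewrite | github.com/wfrancis/astro | astrology_app/astro.py | get_aspects
-- ===== SOURCE A (Python) =====
-- def get_aspects(planet_positions):
--     aspects = []
--     planets = list(planet_positions.keys())
--     for i, planet1 in enumerate(planets):
--         for planet2 in planets[i + 1:]:
--             angle = abs(planet_positions[planet1] - planet_positions[planet2])
--             if angle > 180:
--                 angle = 360 - angle
--             if angle in (0, 30, 45, 60, 90, 120, 135, 180):
--                 aspects.append((planet1, planet2, angle))
--     return aspects
-- ===== SOURCE B (Python) =====
-- # Faster exact re-implementation: group indices by position in a dict, then per
-- # planet probe the 29 position offsets that can form an aspect, instead of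
-- # comparing every pair.
--
-- _OFFSETS = (0, 30, 45, 60, 90, 120, 135, 180, 225, 240, 270, 300, 315, 330, 360,
--             -30, -45, -60, -90, -120, -135, -180, -225, -240, -270, -300, -315, -330, -360)
--
--
-- def get_aspects(planet_positions):
--     planets = list(planet_positions.keys())
--     by_pos = {}
--     for j, name in enumerate(planets):
--         by_pos.setdefault(planet_positions[name], []).append(j)
--     aspects = []
--     for i, planet1 in enumerate(planets):
--         pos1 = planet_positions[planet1]
--         probes = {pos1 + d for d in _OFFSETS}
--         matches = sorted(j for q in probes for j in by_pos.get(q, ()) if j > i)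
--         for j in matches:
--             planet2 = planets[j]
--             diff = abs(pos1 - planet_positions[planet2])
--             aspects.append((planet1, planet2, diff if diff <= 180 else 360 - diff))
--     return aspects
-- ===== Notes on version B (the rewrite author's own statement) =====
-- stated objective: faster
-- what changed: Replaces the all-pairs double loop with a dict grouping indices by position; each planet probes only the 29 position offsets that can yield an aspect and sorts the hit indices to restore A's pair order.
import Mathlib
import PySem

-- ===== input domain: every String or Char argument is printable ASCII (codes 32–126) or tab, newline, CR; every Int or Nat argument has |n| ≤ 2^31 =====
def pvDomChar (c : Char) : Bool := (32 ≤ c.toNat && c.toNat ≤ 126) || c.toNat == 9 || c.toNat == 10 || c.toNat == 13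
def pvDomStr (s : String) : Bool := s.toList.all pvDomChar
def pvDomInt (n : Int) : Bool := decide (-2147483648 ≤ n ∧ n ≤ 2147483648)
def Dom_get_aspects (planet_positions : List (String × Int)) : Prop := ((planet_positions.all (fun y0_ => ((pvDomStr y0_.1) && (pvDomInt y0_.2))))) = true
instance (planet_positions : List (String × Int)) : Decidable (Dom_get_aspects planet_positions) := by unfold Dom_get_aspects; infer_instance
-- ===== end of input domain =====

-- B replaces A's all-pairs double loop by a dict grouping planet indices by position,
-- probing per planet only the 29 offsets that can form an aspect (faster; equal return value).

-- ===== PORT A =====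
-- dict lookups planet_positions[planet] are on keys of the dict, so getD's default is never used (exact)
def get_aspects (planet_positions : List (String × Int)) : List (String × String × Int) :=
  let d := PySem.Dict.ofList planet_positions
  let planets := PySem.Dict.keys d
  (PySem.List.enumerate planets 0).foldl (fun aspects ip =>
    (PySem.List.slice planets (some (ip.1 + 1)) none).foldl (fun acc planet2 =>
      let angle := |PySem.Dict.getD d ip.2 0 - PySem.Dict.getD d planet2 0|
      let angle := if angle > 180 then 360 - angle else angle
      if angle ∈ ([0, 30, 45, 60, 90, 120, 135, 180] : List Int) then
        acc ++ [(ip.2, planet2, angle)]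
      else acc) aspects) []

-- ===== PORT B =====
def aspectOffsets : List Int :=
  [0, 30, 45, 60, 90, 120, 135, 180, 225, 240, 270, 300, 315, 330, 360,
   -30, -45, -60, -90, -120, -135, -180, -225, -240, -270, -300, -315, -330, -360]

-- by_pos.setdefault(pos, []).append(j) is Dict.modify pos [] (· ++ [j]);
-- iterating the Python set 'probes' is safe here: matches is sorted afterwards and
-- each index occurs under exactly one probe value, so the result is order-independent.
def get_aspects_alt (planet_positions : List (String × Int)) : List (String × String × Int) :=
  let d := PySem.Dict.ofList planet_positions
  let planets := PySem.Dict.keys d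
  let by_pos := (PySem.List.enumerate planets 0).foldl
      (fun bp ji => PySem.Dict.modify bp (PySem.Dict.getD d ji.2 0) [] (fun l => l ++ [ji.1]))
      PySem.Dict.empty
  (PySem.List.enumerate planets 0).foldl (fun aspects ip =>
    let pos1 := PySem.Dict.getD d ip.2 0
    let probes := PySem.Set.ofList (aspectOffsets.map (fun t => pos1 + t))
    let hits := PySem.List.sorted
        (probes.flatMap (fun q => (PySem.Dict.getD by_pos q []).filter (fun j => decide (ip.1 < j))))
        (fun x => x) false
    hits.foldl (fun acc j =>
      let planet2 := PySem.List.pyGetD planets j ""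
      let diff := |pos1 - PySem.Dict.getD d planet2 0|
      acc ++ [(ip.2, planet2, if diff ≤ 180 then diff else 360 - diff)]) aspects) []

-- ===== PRECONDITION & SPEC =====
def Spec_get_aspects (planet_positions : List (String × Int)) (out : List (String × String × Int)) : Prop := out = get_aspects_alt planet_positions
instance (planet_positions : List (String × Int)) (out : List (String × String × Int)) : Decidable (Spec_get_aspects planet_positions out) := by unfold Spec_get_aspects; infer_instance

-- ===== CLAIM (what is proved, stated in full; the proofs are below) =====
def Claim_equal_get_aspects : Prop := ∀ (planet_positions : List (String × Int)), Dom_get_aspects planet_positions → Spec_get_aspects planet_positions (get_aspects planet_positions)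

-- ===== LEMMAS AND PROOFS =====

-- A's aspect test on the folded angle equals membership of pos2 in the 29 probe values
lemma cond_iff (a b : Int) :
    (b ∈ aspectOffsets.map (fun t => a + t)) ↔
    ((if |a - b| > 180 then 360 - |a - b| else |a - b|) ∈ ([0, 30, 45, 60, 90, 120, 135, 180] : List Int)) := by
  rcases abs_cases (a - b) with ⟨h1, h2⟩ | ⟨h1, h2⟩ <;>
    simp only [aspectOffsets, List.map_cons, List.map_nil, List.mem_cons, List.not_mem_nil,
      or_false, h1] <;>
    split_ifs <;> constructor <;> intro h <;> omega

lemma val_eq (m : Int) : (if m > 180 then 360 - m else m) = (if m ≤ 180 then m else 360 - m) := by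
  split_ifs <;> omega

-- grouping dict: by_pos[q] is the increasing list of indices whose planet has position q
lemma by_pos_getD (planets : List String) (pos : String → Int) (q : Int) :
    PySem.Dict.getD ((PySem.List.enumerate planets 0).foldl
        (fun bp ji => PySem.Dict.modify bp (pos ji.2) [] (fun l => l ++ [ji.1]))
        PySem.Dict.empty) q []
    = (PySem.List.pyRange 0 (PySem.List.len planets)).filter
        (fun j => pos (PySem.List.pyGetD planets j "") == q) := by
  have h1 : (PySem.List.enumerate planets 0).foldl
      (fun bp ji => PySem.Dict.modify bp (pos ji.2) [] (fun l => l ++ [ji.1])) PySem.Dict.empty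
    = ((PySem.List.enumerate planets 0).map (fun ji => (pos ji.2, ji.1))).foldl
      (fun bp p => PySem.Dict.modify bp p.1 [] (fun l => l ++ [p.2])) PySem.Dict.empty := by
    rw [List.foldl_map]
  rw [h1, PySem.Dict.getD_foldl_modify_append, PySem.Dict.getD_empty, List.nil_append]
  rw [PySem.List.enumerate_eq_map_pyRange planets "", List.map_map, List.filter_map,
    List.map_map]
  simp [Function.comp_def]

-- distributing a filter over distinct group keys is a permutation of one filter
lemma append_filter_perm {β : Type} [DecidableEq β] (key : Int → β) (p : Int → Bool)
    (q : β) (qs : List β) (hq : q ∉ qs) : ∀ (xs : List Int),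
    (xs.filter (fun x => p x && (key x == q)) ++ xs.filter (fun x => p x && decide (key x ∈ qs))).Perm
      (xs.filter (fun x => p x && decide (key x ∈ q :: qs))) := by
  intro xs
  induction xs with
  | nil => simp
  | cons x t iht =>
    by_cases hp : p x = true
    · by_cases hk : key x = q
      · rw [List.filter_cons_of_pos (by simp [hk, hp]),
          List.filter_cons_of_neg (by simp [hk, hq, hp]),
          List.filter_cons_of_pos (by simp [hk, hp]), List.cons_append]
        exact iht.cons x
      · by_cases hm : key x ∈ qs
        · rw [List.filter_cons_of_neg (by simp [hk]),
            List.filter_cons_of_pos (by simp [hm, hp]),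
            List.filter_cons_of_pos (by simp [hm, hp])]
          exact List.perm_middle.trans (iht.cons x)
        · rw [List.filter_cons_of_neg (by simp [hk]),
            List.filter_cons_of_neg (by simp [hm]),
            List.filter_cons_of_neg (by simp [hk, hm])]
          exact iht
    · rw [List.filter_cons_of_neg (by simp [hp]),
        List.filter_cons_of_neg (by simp [hp]),
        List.filter_cons_of_neg (by simp [hp])]
      exact iht


lemma flatMap_filter_perm {β : Type} [DecidableEq β] (xs : List Int) (key : Int → β) (p : Int → Bool)
    (qs : List β) (hnd : qs.Nodup) :
    (qs.flatMap (fun q => xs.filter (fun x => p x && (key x == q)))).Perm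
      (xs.filter (fun x => p x && decide (key x ∈ qs))) := by
  induction qs with
  | nil => simp
  | cons q qs ih =>
    rw [List.flatMap_cons]
    exact ((ih (List.nodup_cons.mp hnd).2).append_left _).trans
      (append_filter_perm key p q qs (List.nodup_cons.mp hnd).1 xs)

-- Python 'if cond: out.append(f(x))' over a Prop condition
lemma foldl_append_ite {α β : Type} (p : α → Prop) [DecidablePred p] (f : α → β)
    (l : List α) (acc : List β) :
    l.foldl (fun acc x => if p x then acc ++ [f x] else acc) acc
      = acc ++ (l.filter (fun x => decide (p x))).map f := by
  induction l generalizing acc with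
  | nil => simp
  | cons x t ih =>
    simp only [List.foldl_cons, List.filter_cons]
    by_cases h : p x <;> simp [h, ih, List.append_assoc]

-- the per-planet bodies of A and B produce the same appended segment
-- (S abstracts B's probe set: the 29 positions that can form an aspect with p1)
lemma inner_eq (planets : List String) (pos : String → Int) (i : Int) (p1 : String)
    (S : List Int) (hi : 0 ≤ i) (hin : i < PySem.List.len planets) (hnd : S.Nodup)
    (hmem : ∀ b, b ∈ S ↔ b ∈ aspectOffsets.map (fun t => pos p1 + t))
    (acc : List (String × String × Int)) :
    (PySem.List.slice planets (some (i + 1)) none).foldl (fun acc planet2 =>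
      let angle := |pos p1 - pos planet2|
      let angle := if angle > 180 then 360 - angle else angle
      if angle ∈ ([0, 30, 45, 60, 90, 120, 135, 180] : List Int) then
        acc ++ [(p1, planet2, angle)]
      else acc) acc
    = (PySem.List.sorted
        (S.flatMap (fun q =>
          (((PySem.List.pyRange 0 (PySem.List.len planets)).filter
              (fun j => pos (PySem.List.pyGetD planets j "") == q)).filter
            (fun j => decide (i < j)))))
        (fun x => x) false).foldl (fun acc j =>
        let planet2 := PySem.List.pyGetD planets j ""
        let diff := |pos p1 - pos planet2|
        acc ++ [(p1, planet2, if diff ≤ 180 then diff else 360 - diff)]) acc := by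
  have hy : ((PySem.List.pyRange 0 (PySem.List.len planets)).filter
        (fun x => decide (i < x) && decide (pos (PySem.List.pyGetD planets x "") ∈ S)))
      = (PySem.List.pyRange (i + 1) (PySem.List.len planets)).filter
        (fun j => decide (pos (PySem.List.pyGetD planets j "") ∈ S)) := by
    rw [PySem.List.pyRange_one_append 0 (i + 1) (PySem.List.len planets) (by omega) (by omega),
      List.filter_append]
    rw [List.filter_eq_nil_iff.mpr (fun x hx => by
      have hb := (PySem.List.mem_pyRange_one.mp hx).2
      simp only [Bool.and_eq_true, decide_eq_true_eq, not_and]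
      exact fun _ => by omega)]
    rw [List.nil_append]
    exact List.filter_congr (fun j hj => by
      have ha := (PySem.List.mem_pyRange_one.mp hj).1
      simp only [show i < j from by omega, decide_true, Bool.true_and])
  have hsorted : PySem.List.sorted
        (S.flatMap (fun q =>
          (((PySem.List.pyRange 0 (PySem.List.len planets)).filter
              (fun j => pos (PySem.List.pyGetD planets j "") == q)).filter
            (fun j => decide (i < j)))))
        (fun x => x) false
      = (PySem.List.pyRange (i + 1) (PySem.List.len planets)).filter
        (fun j => decide (pos (PySem.List.pyGetD planets j "") ∈ S)) := by
    apply PySem.List.sorted_eq_of_perm_of_pairwise_lt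
    · simp only [List.filter_filter]
      rw [← hy]
      exact (flatMap_filter_perm (PySem.List.pyRange 0 (PySem.List.len planets))
        (fun j => pos (PySem.List.pyGetD planets j "")) (fun x => decide (i < x))
        S hnd).symm
    · exact List.Pairwise.filter _ (PySem.List.pairwise_lt_pyRange_one _ _)
  rw [hsorted, PySem.List.slice_from planets (show (0:Int) ≤ i + 1 by omega)]
  show List.foldl (fun acc planet2 =>
      if ((if |pos p1 - pos planet2| > 180 then 360 - |pos p1 - pos planet2|
            else |pos p1 - pos planet2|) ∈ ([0, 30, 45, 60, 90, 120, 135, 180] : List Int))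
      then acc ++ [(p1, planet2, if |pos p1 - pos planet2| > 180 then 360 - |pos p1 - pos planet2|
            else |pos p1 - pos planet2|)]
      else acc) acc (planets.drop (i + 1).toNat)
    = List.foldl (fun acc j => acc ++ [(p1, PySem.List.pyGetD planets j "",
        if |pos p1 - pos (PySem.List.pyGetD planets j "")| ≤ 180
        then |pos p1 - pos (PySem.List.pyGetD planets j "")|
        else 360 - |pos p1 - pos (PySem.List.pyGetD planets j "")|)]) acc
      ((PySem.List.pyRange (i + 1) (PySem.List.len planets)).filter
        (fun j => decide (pos (PySem.List.pyGetD planets j "") ∈ S)))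
  rw [foldl_append_ite, PySem.List.foldl_append_singleton_eq_map]
  congr 1
  rw [show (fun (j : Int) => (p1, PySem.List.pyGetD planets j "",
        if |pos p1 - pos (PySem.List.pyGetD planets j "")| ≤ 180
        then |pos p1 - pos (PySem.List.pyGetD planets j "")|
        else 360 - |pos p1 - pos (PySem.List.pyGetD planets j "")|))
      = ((fun x => (p1, x, if |pos p1 - pos x| ≤ 180 then |pos p1 - pos x|
          else 360 - |pos p1 - pos x|)) ∘ (fun j => PySem.List.pyGetD planets j "")) from rfl]
  rw [← List.map_map]
  rw [show (fun (j : Int) => decide (pos (PySem.List.pyGetD planets j "") ∈ S))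
      = ((fun x => decide (pos x ∈ S)) ∘ (fun j => PySem.List.pyGetD planets j "")) from rfl]
  rw [← List.filter_map, PySem.List.map_pyGetD_pyRange planets "" (by omega)]
  rw [List.filter_congr (fun x _ => show decide ((if |pos p1 - pos x| > 180
        then 360 - |pos p1 - pos x| else |pos p1 - pos x|) ∈
          ([0, 30, 45, 60, 90, 120, 135, 180] : List Int))
      = decide (pos x ∈ S) from by
    rw [decide_eq_decide]
    exact ((hmem (pos x)).trans (cond_iff (pos p1) (pos x))).symm)]
  exact List.map_congr_left (fun x _ => by rw [val_eq])

-- ===== VERDICT (by name: the statement is the Claim_ definition above) =====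
theorem get_aspects_spec : Claim_equal_get_aspects := by
  intro pp _
  unfold Spec_get_aspects get_aspects get_aspects_alt
  apply PySem.List.foldl_congr_mem'
  intro ip hip acc
  obtain ⟨k, hk, hip_eq⟩ := (PySem.List.mem_enumerate_iff _ _ _).mp hip
  have hi : 0 ≤ ip.1 := by rw [hip_eq]; positivity
  have hin : ip.1 < PySem.List.len (PySem.Dict.keys (PySem.Dict.ofList pp)) := by
    rw [hip_eq]; simp [PySem.List.len]; exact_mod_cast hk
  have := inner_eq (PySem.Dict.keys (PySem.Dict.ofList pp))
      (fun nm => PySem.Dict.getD (PySem.Dict.ofList pp) nm 0) ip.1 ip.2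
      (PySem.Set.ofList (aspectOffsets.map (fun t =>
        PySem.Dict.getD (PySem.Dict.ofList pp) ip.2 0 + t)))
      hi hin (PySem.Set.nodup_ofList _) (fun b => PySem.Set.mem_ofList _ b) acc
  simp only [by_pos_getD (PySem.Dict.keys (PySem.Dict.ofList pp))
      (fun nm => PySem.Dict.getD (PySem.Dict.ofList pp) nm 0)]
  exact this
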